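-- pv_equiv track=rewrite | github.com/RichardGabelman/AdventOfCode2024 | Day2/Problem2/main.py | mostDecreasing
-- ===== SOURCE A (Python) =====
-- def allDecreasing(arr):
--     for i, n in enumerate(arr):
--       if i == 0:
--           continue
--       if n >= arr[i - 1]:
--           return False
--     return True
--
-- def mostDecreasing(arr):
--     if allDecreasing(arr):
--         return [idx for idx in range(len(arr))]
--     potentialRemoved = []
--     for i in range(len(arr)):
--         copy = arr.copy()
--         del copy[i]
--         if allDecreasing(copy):
--             potentialRemoved.append(i)
--     return potentialRemoved
-- ===== SOURCE B (Python) =====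
-- def mostDecreasing(arr):
--     n = len(arr)
--     bad = [k for k in range(1, n) if arr[k - 1] <= arr[k]]
--     if len(bad) > 2:
--         return []
--     res = []
--     for i in range(n):
--         if all(k == i or k == i + 1 for k in bad) and (
--             i == 0 or i == n - 1 or arr[i - 1] > arr[i + 1]
--         ):
--             res.append(i)
--     return res
-- ===== Notes on version B (the rewrite author's own statement) =====
-- stated objective: faster
-- what changed: Instead of deleting each index and rescanning the whole list (O(n^2)), B collects in one pass the positions of the non-decreasing adjacent pairs ('bad' pairs), returns the empty result at once if there are more than two, and otherwise tests each index i in O(1): every bad pair must be destroyed by removing i and the new neighbour pair of i must be decreasing.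
import Mathlib
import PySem

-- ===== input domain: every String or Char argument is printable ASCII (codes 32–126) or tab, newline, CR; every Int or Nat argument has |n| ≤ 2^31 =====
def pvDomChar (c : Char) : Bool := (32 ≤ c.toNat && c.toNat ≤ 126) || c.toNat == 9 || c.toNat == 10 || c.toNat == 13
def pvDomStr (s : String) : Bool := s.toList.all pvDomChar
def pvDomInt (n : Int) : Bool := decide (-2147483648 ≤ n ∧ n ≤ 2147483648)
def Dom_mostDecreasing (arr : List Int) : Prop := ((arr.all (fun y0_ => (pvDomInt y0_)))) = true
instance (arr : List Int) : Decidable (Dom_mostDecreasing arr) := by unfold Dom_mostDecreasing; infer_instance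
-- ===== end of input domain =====

-- B replaces A's try-every-removal rescan by one pass collecting the "bad" adjacent pairs
-- and a constant-size test per index (objective: faster).

-- ===== PORT A =====
-- 'for i, n in enumerate(arr): if i == 0: continue; if n >= arr[i-1]: return False'; 'return True'.
-- arr[i-1] is ported with pyGetD; exact because enumerate yields 1 ≤ i < len(arr) at that read.
def allDecAuxA (arr : List Int) : List (Int × Int) → Bool
  | [] => true
  | (i, n) :: rest =>
    if i == 0 then allDecAuxA arr rest
    else if PySem.List.pyGetD arr (i - 1) 0 ≤ n then false
    else allDecAuxA arr rest

def allDecreasingA (arr : List Int) : Bool :=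
  allDecAuxA arr (PySem.List.enumerate arr 0)

def mostDecreasing (arr : List Int) : List Int :=
  if allDecreasingA arr then
    PySem.List.pyRange 0 arr.length 1        -- [idx for idx in range(len(arr))]
  else
    -- for i in range(len(arr)): copy = arr.copy(); del copy[i]; if allDecreasing(copy): append i
    -- 'del copy[i]' is ported as eraseIdx i.toNat; exact because 0 ≤ i < len(arr) here.
    (PySem.List.pyRange 0 arr.length 1).foldl (fun acc i =>
      let copy := arr.eraseIdx i.toNat
      if allDecreasingA copy then acc ++ [i] else acc) []

-- ===== PORT B =====
-- every index B reads is in range, so pyGetD is exact there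
def mostDecreasing_alt (arr : List Int) : List Int :=
  let n : Int := arr.length
  let bad := (PySem.List.pyRange 1 n 1).filter (fun k =>
      PySem.List.pyGetD arr (k - 1) 0 ≤ PySem.List.pyGetD arr k 0)
  if bad.length > 2 then []
  else (PySem.List.pyRange 0 n 1).filter (fun i =>
      bad.all (fun k => k == i || k == i + 1) &&
      (i == 0 || i == n - 1 || PySem.List.pyGetD arr (i + 1) 0 < PySem.List.pyGetD arr (i - 1) 0))

-- ===== PRECONDITION & SPEC =====
def Spec_mostDecreasing (arr : List Int) (out : List Int) : Prop := out = mostDecreasing_alt arr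
instance (arr : List Int) (out : List Int) : Decidable (Spec_mostDecreasing arr out) := by unfold Spec_mostDecreasing; infer_instance

-- ===== CLAIM (what is proved, stated in full; the proofs are below) =====
def Claim_equal_mostDecreasing : Prop := ∀ (arr : List Int), Dom_mostDecreasing arr → Spec_mostDecreasing arr (mostDecreasing arr)

-- ===== LEMMAS AND PROOFS =====

-- "arr is strictly decreasing", in index form
def StrictDec (arr : List Int) : Prop :=
  ∀ k : Nat, 1 ≤ k → ∀ (hk : k < arr.length), arr[k] < arr[k - 1]

theorem drop_cons_facts (arr : List Int) (s : Nat) (x : Int) (l : List Int)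
    (h : arr.drop s = x :: l) :
    s < arr.length ∧ (∀ hs : s < arr.length, arr[s] = x) ∧ arr.drop (s+1) = l := by
  have hlen : s < arr.length := by
    by_contra hc
    rw [List.drop_eq_nil_of_le (by omega)] at h
    simp at h
  have h2 := List.drop_eq_getElem_cons hlen
  rw [h] at h2
  injection h2 with h3 h4
  exact ⟨hlen, fun _ => h3.symm, h4.symm⟩

theorem allDecAuxA_spec (arr : List Int) :
    ∀ (s : Nat) (l : List Int), l = arr.drop s →
      (allDecAuxA arr (PySem.List.enumerate l (s : Int)) = true ↔
        ∀ k : Nat, s ≤ k → 1 ≤ k → ∀ (hk : k < arr.length), arr[k] < arr[k - 1]) := by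
  intro s l
  induction l generalizing s with
  | nil =>
    intro h
    simp [PySem.List.enumerate_nil, allDecAuxA]
    intro k hs h1 hk
    exfalso
    have h2 := congrArg List.length h
    simp at h2
    omega
  | cons x l ih =>
    intro h
    obtain ⟨hs, hx, hdrop⟩ := drop_cons_facts arr s x l h.symm
    rw [PySem.List.enumerate_cons]
    by_cases hs0 : s = 0
    · subst hs0
      simp only [allDecAuxA, Nat.cast_zero, beq_self_eq_true, if_pos]
      rw [show ((0:Int) + 1) = ((1:Nat) : Int) by norm_num]
      rw [ih 1 hdrop.symm]
      constructor
      · intro H k _ h1 hk; exact H k h1 h1 hk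
      · intro H k _ h1 hk; exact H k (by omega) h1 hk
    · have hsne : ((s:Int) == 0) = false := by simp; omega
      simp only [allDecAuxA, hsne, Bool.false_eq_true, if_false]
      have hget : PySem.List.pyGetD arr ((s:Int) - 1) 0 = arr[s-1]'(by omega) := by
        have := PySem.List.pyGetD_eq_getElem (xs := arr) (i := (s:Int) - 1) (d := 0)
          (by omega) (by omega)
        rw [this]
        congr 1
        omega
      rw [hget, ← hx hs]
      by_cases hle : arr[s-1]'(by omega) ≤ arr[s]
      · simp only [if_pos hle]
        constructor
        · intro hf; exact absurd hf (by simp)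
        · intro H
          exfalso
          have := H s (le_refl s) (by omega) hs
          omega
      · simp only [if_neg hle]
        rw [show ((s:Int) + 1) = (((s+1):Nat) : Int) by push_cast; ring]
        rw [ih (s+1) hdrop.symm]
        constructor
        · intro H k hsk h1 hk
          by_cases hks : k = s
          · subst hks; omega
          · exact H k (by omega) h1 hk
        · intro H k hsk h1 hk; exact H k (by omega) h1 hk

theorem allDecreasingA_spec (arr : List Int) :
    allDecreasingA arr = true ↔ StrictDec arr := by
  unfold allDecreasingA
  have h := allDecAuxA_spec arr 0 arr (by simp)
  rw [Nat.cast_zero] at h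
  rw [h]
  unfold StrictDec
  constructor
  · intro H k h1 hk; exact H k (Nat.zero_le k) h1 hk
  · intro H k _ h1 hk; exact H k h1 hk

-- pair structure of a list with index i removed
theorem strictDec_eraseIdx_iff (arr : List Int) (i : Nat) (hi : i < arr.length) :
    StrictDec (arr.eraseIdx i) ↔
      ((∀ k : Nat, 1 ≤ k → ∀ (hk : k < arr.length), k ≠ i → k ≠ i + 1 → arr[k] < arr[k - 1]) ∧
        (1 ≤ i → ∀ (h1 : i + 1 < arr.length), arr[i + 1] < arr[i - 1])) := by
  have hlen : (arr.eraseIdx i).length = arr.length - 1 := by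
    rw [List.length_eraseIdx]; simp [hi]
  have hget : ∀ (j : Nat) (hj : j < (arr.eraseIdx i).length),
      (arr.eraseIdx i)[j] = if j < i then arr[j]'(by omega) else arr[j+1]'(by omega) := by
    intro j hj
    split
    · rw [List.getElem_eraseIdx_of_lt]; omega
    · rw [List.getElem_eraseIdx_of_ge]; omega
  constructor
  · intro H
    constructor
    · intro k h1 hk hne hne1
      by_cases hki : k < i
      · have := H k h1 (by omega)
        rw [hget k (by omega), hget (k-1) (by omega)] at this
        rw [if_pos hki, if_pos (by omega)] at this
        convert this using 2
      · have hk2 : i + 1 < k := by omega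
        have := H (k-1) (by omega) (by omega)
        rw [hget (k-1) (by omega), hget (k-1-1) (by omega)] at this
        rw [if_neg (by omega), if_neg (by omega)] at this
        convert this using 2
        all_goals omega
    · intro h1i hi1
      have := H i (by omega) (by omega)
      rw [hget i (by omega), hget (i-1) (by omega)] at this
      rw [if_neg (by omega), if_pos (by omega)] at this
      convert this using 2
  · rintro ⟨H1, H2⟩ j h1 hj
    rw [hget j hj, hget (j-1) (by omega)]
    by_cases hji : j < i
    · rw [if_pos hji, if_pos (by omega)]
      exact H1 j h1 (by omega) (by omega) (by omega)
    · by_cases hje : j = i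
      · subst hje
        rw [if_neg (by omega), if_pos (by omega)]
        exact H2 (by omega) (by omega)
      · rw [if_neg (by omega), if_neg (by omega)]
        have := H1 (j+1) (by omega) (by omega) (by omega) (by omega)
        convert this using 2
        all_goals omega

-- pigeonhole: a nodup list of Ints all in {i, i+1} has at most 2 elements
theorem nodup_two_vals_len (l : List Int) (i : Int) (hnd : l.Nodup)
    (h : ∀ k ∈ l, k = i ∨ k = i + 1) : l.length ≤ 2 := by
  match l with
  | [] => simp
  | [_] => simp
  | [_, _] => simp
  | a :: b :: c :: t =>
    exfalso
    simp [List.nodup_cons] at hnd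
    have ha := h a (by simp)
    have hb := h b (by simp)
    have hc := h c (by simp)
    omega

theorem gD (arr : List Int) (j : Int) (h0 : 0 ≤ j) (h1 : j < (arr.length : Int)) :
    PySem.List.pyGetD arr j 0 = arr[j.toNat]'(by omega) :=
  PySem.List.pyGetD_eq_getElem arr 0 h0 h1

-- A's per-removal test equals B's per-index test
theorem point_iff (arr : List Int) (i : Int) (h0 : 0 ≤ i) (h1 : i < (arr.length : Int)) :
    allDecreasingA (arr.eraseIdx i.toNat) =
      (((PySem.List.pyRange 1 (arr.length : Int) 1).filter (fun k =>
          PySem.List.pyGetD arr (k - 1) 0 ≤ PySem.List.pyGetD arr k 0)).all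
            (fun k => k == i || k == i + 1) &&
        (i == 0 || i == (arr.length : Int) - 1 ||
          PySem.List.pyGetD arr (i + 1) 0 < PySem.List.pyGetD arr (i - 1) 0)) := by
  rw [Bool.eq_iff_iff, allDecreasingA_spec,
    strictDec_eraseIdx_iff arr i.toNat (by omega)]
  simp only [Bool.and_eq_true, List.all_eq_true, List.mem_filter,
    PySem.List.mem_pyRange_one, Bool.or_eq_true, beq_iff_eq, decide_eq_true_eq]
  constructor
  · rintro ⟨HA1, HA2⟩
    constructor
    · intro k hk
      obtain ⟨⟨hk1, hk2⟩, hle⟩ := hk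
      by_contra hne
      push Not at hne
      rw [gD arr (k - 1) (by omega) (by omega), gD arr k (by omega) (by omega)] at hle
      simp only [show (k - 1).toNat = k.toNat - 1 from by omega] at hle
      have := HA1 k.toNat (by omega) (by omega) (by omega) (by omega)
      omega
    · by_cases hz : i = 0
      · exact Or.inl (Or.inl hz)
      · by_cases hl : i = (arr.length : Int) - 1
        · exact Or.inl (Or.inr hl)
        · refine Or.inr ?_
          have := HA2 (by omega) (by omega)
          rw [gD arr (i + 1) (by omega) (by omega), gD arr (i - 1) (by omega) (by omega)]
          simp only [show (i + 1).toNat = i.toNat + 1 from by omega,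
            show (i - 1).toNat = i.toNat - 1 from by omega]
          exact this
  · rintro ⟨HB1, HB2⟩
    constructor
    · intro k hk1 hk hne hne1
      by_contra hge
      push Not at hge
      have := HB1 (k : Int) ⟨⟨by omega, by omega⟩, by
        rw [gD arr ((k : Int) - 1) (by omega) (by omega), gD arr (k : Int) (by omega) (by omega)]
        simp only [show ((k : Int) - 1).toNat = k - 1 from by omega, Int.toNat_natCast]
        exact hge⟩
      omega
    · intro hi1 hlen
      rcases HB2 with (h | h) | h
      · omega
      · omega
      · rw [gD arr (i + 1) (by omega) (by omega), gD arr (i - 1) (by omega) (by omega)] at h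
        simp only [show (i + 1).toNat = i.toNat + 1 from by omega,
          show (i - 1).toNat = i.toNat - 1 from by omega] at h
        exact h

theorem mostDecreasing_spec' (arr : List Int) :
    mostDecreasing arr = mostDecreasing_alt arr := by
  have hAdef : mostDecreasing arr =
      (if allDecreasingA arr then
        PySem.List.pyRange 0 arr.length 1
      else
        (PySem.List.pyRange 0 arr.length 1).foldl (fun acc i =>
          if allDecreasingA (arr.eraseIdx i.toNat) then acc ++ [i] else acc) []) := rfl
  have hBdef : mostDecreasing_alt arr =
      (if ((PySem.List.pyRange 1 (arr.length : Int) 1).filter (fun k =>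
            PySem.List.pyGetD arr (k - 1) 0 ≤ PySem.List.pyGetD arr k 0)).length > 2 then []
      else (PySem.List.pyRange 0 (arr.length : Int) 1).filter (fun i =>
          ((PySem.List.pyRange 1 (arr.length : Int) 1).filter (fun k =>
            PySem.List.pyGetD arr (k - 1) 0 ≤ PySem.List.pyGetD arr k 0)).all
              (fun k => k == i || k == i + 1) &&
          (i == 0 || i == (arr.length : Int) - 1 ||
            PySem.List.pyGetD arr (i + 1) 0 < PySem.List.pyGetD arr (i - 1) 0))) := rfl
  rw [hAdef, hBdef]
  by_cases hall : allDecreasingA arr = true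
  · rw [if_pos hall]
    have hSD : StrictDec arr := (allDecreasingA_spec arr).1 hall
    have hbad : ((PySem.List.pyRange 1 (arr.length : Int) 1).filter (fun k =>
        PySem.List.pyGetD arr (k - 1) 0 ≤ PySem.List.pyGetD arr k 0)) = [] := by
      rw [List.filter_eq_nil_iff]
      intro k hk
      rw [PySem.List.mem_pyRange_one] at hk
      simp only [decide_eq_true_eq]
      rw [gD arr (k - 1) (by omega) (by omega), gD arr k (by omega) (by omega)]
      simp only [show (k - 1).toNat = k.toNat - 1 from by omega]
      have := hSD k.toNat (by omega) (by omega)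
      omega
    rw [hbad]
    rw [if_neg (by simp)]
    symm
    rw [List.filter_eq_self]
    intro a ha
    rw [PySem.List.mem_pyRange_one] at ha
    simp only [List.all_nil, Bool.true_and, Bool.or_eq_true, beq_iff_eq, decide_eq_true_eq]
    by_cases hz : a = 0
    · exact Or.inl (Or.inl hz)
    · by_cases hl : a = (arr.length : Int) - 1
      · exact Or.inl (Or.inr hl)
      · refine Or.inr ?_
        have t1 := hSD a.toNat (by omega) (by omega)
        have t2 := hSD (a.toNat + 1) (by omega) (by omega)
        simp only [Nat.add_sub_cancel] at t2
        rw [gD arr (a + 1) (by omega) (by omega), gD arr (a - 1) (by omega) (by omega)]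
        simp only [show (a + 1).toNat = a.toNat + 1 from by omega,
          show (a - 1).toNat = a.toNat - 1 from by omega]
        omega
  · rw [if_neg hall]
    have hfold : (PySem.List.pyRange 0 (arr.length : Int) 1).foldl (fun acc i =>
          if allDecreasingA (arr.eraseIdx i.toNat) then acc ++ [i] else acc) []
        = (PySem.List.pyRange 0 (arr.length : Int) 1).filter
            (fun i => allDecreasingA (arr.eraseIdx i.toNat)) := by
      rw [show (fun (acc : List Int) (i : Int) =>
            if allDecreasingA (arr.eraseIdx i.toNat) then acc ++ [i] else acc)
          = (fun (acc : List Int) (i : Int) =>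
            if (fun j => allDecreasingA (arr.eraseIdx j.toNat)) i then acc ++ [id i] else acc)
          from rfl]
      rw [PySem.List.foldl_append_if]
      simp
    rw [hfold]
    have hcongr := List.filter_congr
      (l := PySem.List.pyRange 0 (arr.length : Int) 1)
      (fun i hi => point_iff arr i (PySem.List.mem_pyRange_one.mp hi).1
        (PySem.List.mem_pyRange_one.mp hi).2)
    rw [hcongr]
    by_cases hlen : ((PySem.List.pyRange 1 (arr.length : Int) 1).filter (fun k =>
        PySem.List.pyGetD arr (k - 1) 0 ≤ PySem.List.pyGetD arr k 0)).length > 2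
    · rw [if_pos hlen]
      rw [List.filter_eq_nil_iff]
      intro a ha
      rw [PySem.List.mem_pyRange_one] at ha
      intro hcontra
      rw [Bool.and_eq_true] at hcontra
      obtain ⟨hall2, _⟩ := hcontra
      rw [List.all_eq_true] at hall2
      have hnd : ((PySem.List.pyRange 1 (arr.length : Int) 1).filter (fun k =>
          PySem.List.pyGetD arr (k - 1) 0 ≤ PySem.List.pyGetD arr k 0)).Nodup :=
        (PySem.List.nodup_pyRange_one 1 (arr.length : Int)).filter _
      have := nodup_two_vals_len _ a hnd (fun k hk => by
        have := hall2 k hk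
        simpa using this)
      omega
    · rw [if_neg hlen]

-- ===== VERDICT (by name: the statement is the Claim_ definition above) =====
theorem mostDecreasing_spec : Claim_equal_mostDecreasing := by
  intro arr _
  exact mostDecreasing_spec' arr
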